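-- pv_equiv track=rewrite | github.com/jebarfig21/Memorama-Terminal- | Memorama/src/tablero.py | creaSaltos
-- ===== SOURCE A (Python) =====
-- def creaSaltos(tablero):
--     cadena = ""
--     tablero = tablero.split("\t")
--     for i in range(len(tablero)-1):
--         if(i==0):
--             cadena = "--------|---------------|---------------|---------------|"+"\n"
--         cadena = cadena+tablero[i]+"\t"+"|"+"\t"
--
--         if(i%4==3):
--             cadena = cadena+"\n"+"--------|---------------|---------------|---------------|"+"\n"
--
--     return cadena
-- ===== SOURCE B (Python) =====
-- def creaSaltos(tablero):
--     header = "--------|---------------|---------------|---------------|"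
--     cells = tablero.split("\t")[:-1]
--     if not cells:
--         return ""
--
--     def rows(l):
--         if not l:
--             return ""
--         g = l[:4]
--         end = "\n" + header + "\n" if len(g) == 4 else ""
--         return "".join(c + "\t|\t" for c in g) + end + rows(l[4:])
--
--     return header + "\n" + rows(cells)
-- ===== Notes on version B (the rewrite author's own statement) =====
-- stated objective: alternative
-- what changed: Replaces the flat index loop with its i==0 header reset and i%4==3 modulo test by a recursive rows-of-four traversal over the cell list (drop last cell, emit header once, then process explicit groups of up to 4 cells, closing a row only after a full group).
import Mathlib
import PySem

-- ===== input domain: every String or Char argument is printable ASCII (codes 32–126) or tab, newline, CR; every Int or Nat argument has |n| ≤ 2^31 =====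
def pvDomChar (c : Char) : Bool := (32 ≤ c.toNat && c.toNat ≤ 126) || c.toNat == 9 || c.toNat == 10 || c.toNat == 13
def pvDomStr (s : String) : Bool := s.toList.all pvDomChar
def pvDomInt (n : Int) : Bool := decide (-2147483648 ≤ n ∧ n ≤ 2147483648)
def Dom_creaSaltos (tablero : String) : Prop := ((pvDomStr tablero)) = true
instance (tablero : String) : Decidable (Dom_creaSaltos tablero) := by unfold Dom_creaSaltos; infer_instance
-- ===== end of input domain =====

-- B replaces A's flat index loop (i==0 header reset, i%4==3 modulo test) by a recursive
-- rows-of-four traversal over the cell list; same output, alternative decomposition.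

def pvHdr : String := "--------|---------------|---------------|---------------|"

-- ===== PORT A =====
-- split? is `some` here since the separator "\t" is nonempty; getD [] only discharges the Option
def creaSaltos (tablero : String) : String :=
  let parts := (PySem.Str.split? tablero "\t").getD []
  (PySem.List.pyRange 0 ((parts.length : Int) - 1) 1).foldl
    (fun cadena i =>
      let cadena := if i == 0 then pvHdr ++ "\n" else cadena
      let cadena := cadena ++ PySem.List.pyGetD parts i "" ++ "\t" ++ "|" ++ "\t"
      if PySem.Int.mod i 4 == 3 then cadena ++ "\n" ++ pvHdr ++ "\n" else cadena)
    ""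

-- ===== PORT B =====
def pvRows (l : List String) : String :=
  if l = [] then ""
  else
    let g := l.take 4
    String.join (g.map (fun c => c ++ "\t|\t"))
      ++ (if g.length == 4 then "\n" ++ pvHdr ++ "\n" else "")
      ++ pvRows (l.drop 4)
termination_by l.length
decreasing_by
  rename_i h
  have : l.length ≠ 0 := fun h0 => h (List.eq_nil_of_length_eq_zero h0)
  simp [List.length_drop]; omega

def creaSaltos_alt (tablero : String) : String :=
  let cells := ((PySem.Str.split? tablero "\t").getD []).dropLast
  if cells.isEmpty then "" else pvHdr ++ "\n" ++ pvRows cells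

-- ===== PRECONDITION & SPEC =====
def Spec_creaSaltos (tablero : String) (out : String) : Prop := out = creaSaltos_alt tablero
instance (tablero : String) (out : String) : Decidable (Spec_creaSaltos tablero out) := by unfold Spec_creaSaltos; infer_instance

-- ===== CLAIM (what is proved, stated in full; the proofs are below) =====
def Claim_equal_creaSaltos : Prop := ∀ (tablero : String), Dom_creaSaltos tablero → Spec_creaSaltos tablero (creaSaltos tablero)

-- ===== LEMMAS AND PROOFS =====

-- proof-only helper: one cell at a time, carrying the position-within-row r = i % 4
def pvGoR : Nat → List String → String
  | _, [] => ""
  | r, c :: t =>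
      c ++ "\t|\t" ++ (if r == 3 then "\n" ++ pvHdr ++ "\n" else "") ++ pvGoR ((r + 1) % 4) t

theorem pv_mod4 (i : Int) (h : 0 ≤ i) : PySem.Int.mod i 4 = ((i.toNat % 4 : Nat) : Int) := by
  unfold PySem.Int.mod
  rw [Int.fmod_eq_emod]
  · omega

theorem pvRows_eq_goR : ∀ (n : Nat) (l : List String), l.length ≤ n → pvRows l = pvGoR 0 l := by
  intro n
  induction n with
  | zero =>
    intro l hl
    have : l = [] := List.eq_nil_of_length_eq_zero (Nat.le_zero.mp hl)
    subst this
    rw [pvRows]; simp [pvGoR]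
  | succ n ih =>
    intro l hl
    match l with
    | [] => rw [pvRows]; simp [pvGoR]
    | [a] =>
      rw [pvRows]
      simp [pvGoR, String.join, String.append_assoc, String.append_empty]
      rw [pvRows]; simp
    | [a, b] =>
      rw [pvRows]
      simp [pvGoR, String.join, String.append_assoc, String.append_empty]
      rw [pvRows]; simp
    | [a, b, c] =>
      rw [pvRows]
      simp [pvGoR, String.join, String.append_assoc, String.append_empty]
      rw [pvRows]; simp
    | a :: b :: c :: d :: t =>
      rw [pvRows]
      have ht : t.length ≤ n := by simp at hl; omega
      simp [pvGoR, String.join, String.append_assoc, String.append_empty, ih t ht]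
theorem pv_foldl_eq_goR (cells : List String) :
    ∀ (t : List String) (i : Int) (acc : String), 0 ≤ i → cells.drop i.toNat = t →
      (PySem.List.pyRange i (cells.length : Int) 1).foldl
        (fun cadena i =>
          let cadena := cadena ++ PySem.List.pyGetD cells i "" ++ "\t" ++ "|" ++ "\t"
          if PySem.Int.mod i 4 == 3 then cadena ++ "\n" ++ pvHdr ++ "\n" else cadena)
        acc
      = acc ++ pvGoR (i.toNat % 4) t := by
  intro t
  induction t with
  | nil =>
    intro i acc hi hd
    have hlen : cells.length ≤ i.toNat := by
      by_contra h
      have := List.drop_eq_nil_iff.mp hd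
      omega
    rw [PySem.List.pyRange_one_eq_nil (by omega)]
    simp [pvGoR]
  | cons c t ih =>
    intro i acc hi hd
    have hlt : i.toNat < cells.length := by
      by_contra h
      rw [List.drop_eq_nil_of_le (by omega)] at hd
      simp at hd
    have hget : PySem.List.pyGetD cells i "" = c := by
      rw [PySem.List.pyGetD_eq_getElem cells "" hi (by omega)]
      have h0 : (cells.drop i.toNat)[0]'(by rw [hd]; simp) = c := by
        simp [hd]
      rw [List.getElem_drop] at h0
      simpa using h0
    have hdrop : cells.drop ((i + 1).toNat) = t := by
      have : (i + 1).toNat = i.toNat + 1 := by omega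
      rw [this, ← List.drop_drop]
      simp [hd]
    rw [PySem.List.pyRange_one_cons (by omega)]
    simp only [List.foldl_cons]
    rw [ih (i + 1) _ (by omega) hdrop]
    have htn : (i + 1).toNat = i.toNat + 1 := by omega
    rw [pv_mod4 i hi, htn]
    have hbeq : ((((i.toNat % 4 : Nat) : Int)) == 3) = ((i.toNat % 4) == 3) := by
      by_cases h4 : i.toNat % 4 = 3 <;> simp [h4]; omega
    rw [hbeq]
    have h4' : (i.toNat + 1) % 4 = (i.toNat % 4 + 1) % 4 := by omega
    by_cases h4 : i.toNat % 4 = 3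
    · simp only [pvGoR, h4, h4', hget, beq_self_eq_true, if_pos]
      rw [← String.toList_inj]
      simp [String.toList_append]
    · have h4b : ((i.toNat % 4) == 3) = false := by simp [h4]
      simp only [pvGoR, h4b, h4', hget, Bool.false_eq_true, if_false]
      rw [← String.toList_inj]
      simp [String.toList_append]

theorem pv_mainA (cells : List String) :
    (PySem.List.pyRange 0 ((cells.length : Int)) 1).foldl
      (fun cadena i =>
        let cadena := if i == 0 then pvHdr ++ "\n" else cadena
        let cadena := cadena ++ PySem.List.pyGetD cells i "" ++ "\t" ++ "|" ++ "\t"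
        if PySem.Int.mod i 4 == 3 then cadena ++ "\n" ++ pvHdr ++ "\n" else cadena) ""
    = if cells.isEmpty then "" else pvHdr ++ "\n" ++ pvRows cells := by
  cases cells with
  | nil => simp
  | cons c t =>
    rw [PySem.List.pyRange_one_cons (by exact_mod_cast Nat.succ_pos t.length)]
    rw [List.foldl_cons]
    have hstep :
        (let cadena := if ((0:Int) == 0) = true then pvHdr ++ "\n" else ""
         let cadena := cadena ++ PySem.List.pyGetD (c :: t) (0:Int) "" ++ "\t" ++ "|" ++ "\t"
         if (PySem.Int.mod (0:Int) 4 == 3) = true then cadena ++ "\n" ++ pvHdr ++ "\n" else cadena)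
        = (pvHdr ++ "\n") ++ c ++ "\t" ++ "|" ++ "\t" := by
      simp [PySem.List.pyGetD, PySem.Int.mod]
    rw [hstep]
    have hcongr2 :
        (PySem.List.pyRange 1 (((c :: t : List String).length : Int)) 1).foldl
          (fun cadena i =>
            let cadena := if i == 0 then pvHdr ++ "\n" else cadena
            let cadena := cadena ++ PySem.List.pyGetD (c :: t) i "" ++ "\t" ++ "|" ++ "\t"
            if PySem.Int.mod i 4 == 3 then cadena ++ "\n" ++ pvHdr ++ "\n" else cadena)
          ((pvHdr ++ "\n") ++ c ++ "\t" ++ "|" ++ "\t")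
        = (PySem.List.pyRange 1 (((c :: t : List String).length : Int)) 1).foldl
          (fun cadena i =>
            let cadena := cadena ++ PySem.List.pyGetD (c :: t) i "" ++ "\t" ++ "|" ++ "\t"
            if PySem.Int.mod i 4 == 3 then cadena ++ "\n" ++ pvHdr ++ "\n" else cadena)
          ((pvHdr ++ "\n") ++ c ++ "\t" ++ "|" ++ "\t") := by
      apply PySem.List.foldl_congr_mem
      intro acc i hmem
      have hb := PySem.List.mem_pyRange_one.mp hmem
      have hz : ¬ ((i == (0:Int)) = true) := by simp; omega
      simp only [hz, Bool.false_eq_true]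
      simp
    simp only [show ((0:Int) + 1) = 1 by norm_num]
    rw [hcongr2]
    rw [pv_foldl_eq_goR (c :: t) t 1 _ (by norm_num) (by simp)]
    rw [if_neg (by simp)]
    rw [pvRows_eq_goR (c :: t).length _ (le_refl _)]
    simp only [pvGoR]
    rw [← String.toList_inj]
    simp [String.toList_append]

-- ===== VERDICT (by name: the statement is the Claim_ definition above) =====
theorem creaSaltos_spec : Claim_equal_creaSaltos := by
  intro tablero _
  simp only [Spec_creaSaltos, creaSaltos, creaSaltos_alt]
  by_cases hp : (PySem.Str.split? tablero "\t").getD [] = []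
  · rw [hp]
    simp
  · set parts := (PySem.Str.split? tablero "\t").getD [] with hparts
    have hlen : (parts.length : Int) - 1 = (parts.dropLast.length : Int) := by
      have : 1 ≤ parts.length := List.length_pos_of_ne_nil hp
      simp [List.length_dropLast]
      omega
    rw [hlen]
    have hcongr :
        (PySem.List.pyRange 0 ((parts.dropLast.length : Int)) 1).foldl
          (fun cadena i =>
            let cadena := if i == 0 then pvHdr ++ "\n" else cadena
            let cadena := cadena ++ PySem.List.pyGetD parts i "" ++ "\t" ++ "|" ++ "\t"
            if PySem.Int.mod i 4 == 3 then cadena ++ "\n" ++ pvHdr ++ "\n" else cadena) ""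
        = (PySem.List.pyRange 0 ((parts.dropLast.length : Int)) 1).foldl
          (fun cadena i =>
            let cadena := if i == 0 then pvHdr ++ "\n" else cadena
            let cadena := cadena ++ PySem.List.pyGetD parts.dropLast i "" ++ "\t" ++ "|" ++ "\t"
            if PySem.Int.mod i 4 == 3 then cadena ++ "\n" ++ pvHdr ++ "\n" else cadena) "" := by
      apply PySem.List.foldl_congr_mem
      intro acc i hmem
      have hb := PySem.List.mem_pyRange_one.mp hmem
      have h1 := PySem.List.pyGetD_eq_getElem parts "" hb.1 (by simp at hb ⊢; omega)
      have h2 := PySem.List.pyGetD_eq_getElem parts.dropLast "" hb.1 (by simpa using hb.2)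
      have hget : PySem.List.pyGetD parts i "" = PySem.List.pyGetD parts.dropLast i "" := by
        rw [h2]
        rw [h1]
        exact (List.getElem_dropLast ..).symm
      simp only [hget]
    rw [hcongr]
    exact pv_mainA parts.dropLast
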